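-- pv_equiv track=rewrite | github.com/Ivaneres/BlenderSatAI | lidarNet/dataset.py | calculate_unet_output_dim
-- ===== SOURCE A (Python) =====
-- def calculate_unet_output_dim(input_dim, num_layers):
--     cur_dim = input_dim
--     for _ in range(num_layers):
--         cur_dim -= 4
--         cur_dim //= 2
--     for _ in range(num_layers):
--         cur_dim -= 4
--         cur_dim *= 2
--     cur_dim -= 4
--     return cur_dim
-- ===== SOURCE B (Python) =====
-- def calculate_unet_output_dim(input_dim, num_layers):
--     cur_dim = input_dim
--     for _ in range(num_layers):
--         cur_dim = (cur_dim - 4) // 2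
--     if num_layers > 0:
--         cur_dim = 8 + (1 << num_layers) * (cur_dim - 8)
--     return cur_dim - 4
-- ===== Notes on version B (the rewrite author's own statement) =====
-- stated objective: alternative
-- what changed: The upsampling loop (x -> 2*(x-4), num_layers times) plus the trailing -4 is replaced by the closed form 8 + 2**num_layers * (x - 8) - 4 of the affine recurrence; only the floor-division downsampling loop, which has no exact closed form, remains iterative.
import Mathlib
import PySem

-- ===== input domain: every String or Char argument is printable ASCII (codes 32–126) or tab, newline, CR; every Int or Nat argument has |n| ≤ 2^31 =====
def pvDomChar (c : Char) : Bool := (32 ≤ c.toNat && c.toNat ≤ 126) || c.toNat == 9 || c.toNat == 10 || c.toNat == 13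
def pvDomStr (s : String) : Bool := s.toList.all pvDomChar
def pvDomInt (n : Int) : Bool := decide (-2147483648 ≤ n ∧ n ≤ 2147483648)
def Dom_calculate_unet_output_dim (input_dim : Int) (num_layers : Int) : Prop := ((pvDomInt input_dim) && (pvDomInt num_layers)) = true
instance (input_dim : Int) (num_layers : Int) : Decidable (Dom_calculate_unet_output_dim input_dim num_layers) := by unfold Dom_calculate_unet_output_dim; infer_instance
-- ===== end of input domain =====

-- B replaces A's second (doubling) loop and trailing -4 by the closed form 8 + 2^n*(x-8) - 4; same result, no speed claim.

-- ===== PORT A =====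
-- first loop of A: cur_dim -= 4; cur_dim //= 2, repeated
def pvA_down : Nat → Int → Int
  | 0, x => x
  | n+1, x => pvA_down n (PySem.Int.floordiv (x - 4) 2)

-- second loop of A: cur_dim -= 4; cur_dim *= 2, repeated
def pvA_up : Nat → Int → Int
  | 0, x => x
  | n+1, x => pvA_up n ((x - 4) * 2)

def calculate_unet_output_dim (input_dim : Int) (num_layers : Int) : Int :=
  pvA_up num_layers.toNat (pvA_down num_layers.toNat input_dim) - 4

-- ===== PORT B =====
-- B's down-pass loop (same recurrence as A's first loop, kept iterative)
def pvB_down : Nat → Int → Int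
  | 0, x => x
  | n+1, x => pvB_down n (PySem.Int.floordiv (x - 4) 2)

def calculate_unet_output_dim_alt (input_dim : Int) (num_layers : Int) : Int :=
  let c := pvB_down num_layers.toNat input_dim
  let c' := if 0 < num_layers then 8 + 2 ^ num_layers.toNat * (c - 8) else c
  c' - 4

-- ===== PRECONDITION & SPEC =====
def Spec_calculate_unet_output_dim (input_dim : Int) (num_layers : Int) (out : Int) : Prop := out = calculate_unet_output_dim_alt input_dim num_layers
instance (input_dim : Int) (num_layers : Int) (out : Int) : Decidable (Spec_calculate_unet_output_dim input_dim num_layers out) := by unfold Spec_calculate_unet_output_dim; infer_instance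

-- ===== CLAIM (what is proved, stated in full; the proofs are below) =====
def Claim_equal_calculate_unet_output_dim : Prop := ∀ (input_dim : Int) (num_layers : Int), Dom_calculate_unet_output_dim input_dim num_layers → Spec_calculate_unet_output_dim input_dim num_layers (calculate_unet_output_dim input_dim num_layers)

-- ===== LEMMAS AND PROOFS =====
theorem pvA_up_closed (n : Nat) (x : Int) : pvA_up n x = 8 + 2 ^ n * (x - 8) := by
  induction n generalizing x with
  | zero => simp [pvA_up]
  | succ k ih => simp [pvA_up, ih]; ring

theorem pvB_down_eq (n : Nat) (x : Int) : pvB_down n x = pvA_down n x := by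
  induction n generalizing x with
  | zero => rfl
  | succ k ih => simp [pvB_down, pvA_down, ih]

-- ===== VERDICT (by name: the statement is the Claim_ definition above) =====
theorem calculate_unet_output_dim_spec : Claim_equal_calculate_unet_output_dim := by
  intro input_dim num_layers _
  unfold Spec_calculate_unet_output_dim calculate_unet_output_dim calculate_unet_output_dim_alt
  rw [pvB_down_eq, pvA_up_closed]
  by_cases h : 0 < num_layers
  · simp [h]
  · have : num_layers.toNat = 0 := by omega
    simp [this, h]
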